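-- pv_equiv track=rewrite | github.com/tobebetter9527/it-learning | dsa-learning/dsa-python-code/com/dsa/leetcode/labuladong/array/matrix/P151_ReverseWordsInAString.py | trimSpaces
-- ===== SOURCE A (Python) =====
-- def trimSpaces(s: str):
--     words = []
--     n, i = len(s), 0
--     while i < n:
--         if s[i] != " ":
--             while i < n and s[i] != " ":
--                 words.append(s[i])
--                 i += 1
--             words.append(" ")
--         i += 1
--     return words[0:len(words) - 1]
-- ===== SOURCE B (Python) =====
-- def trimSpaces(s: str):
--     return list(" ".join(w for w in s.split(" ") if w))
-- ===== Notes on version B (the rewrite author's own statement) =====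
-- stated objective: idiomatic
-- what changed: Replaces A's manual index-based two-level while-loop character scan with tokenize-then-join: split on the literal space, drop empty tokens, join with single spaces, and return the character list.
import Mathlib
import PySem

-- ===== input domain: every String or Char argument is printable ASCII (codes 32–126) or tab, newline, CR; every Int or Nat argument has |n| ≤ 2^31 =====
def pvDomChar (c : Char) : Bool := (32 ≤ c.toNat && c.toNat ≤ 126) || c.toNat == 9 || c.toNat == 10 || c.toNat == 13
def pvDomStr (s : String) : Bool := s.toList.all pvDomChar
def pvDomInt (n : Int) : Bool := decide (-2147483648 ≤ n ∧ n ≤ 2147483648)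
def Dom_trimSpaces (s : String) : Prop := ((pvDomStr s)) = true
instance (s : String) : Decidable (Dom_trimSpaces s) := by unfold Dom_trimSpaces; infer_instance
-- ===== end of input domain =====

-- B replaces A's manual index-based two-level while scan with an idiomatic
-- split-on-space / filter / join pipeline; same O(n) cost, same return value.


-- ===== PORT A =====
-- inner while: `while i < n and s[i] != " ": words.append(s[i]); i += 1`
def trimInner (cs : List Char) (n : Nat) (i : Nat) (words : List String) : Nat × List String :=
  if i < n ∧ cs.getD i ' ' ≠ ' ' then
    trimInner cs n (i + 1) (words ++ [String.ofList [cs.getD i ' ']])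
  else (i, words)
termination_by n - i
decreasing_by omega

-- the inner loop never moves i backwards (used for termination of the outer loop)
theorem trimInner_fst_ge (cs : List Char) (n : Nat) :
    ∀ fuel i words, n - i ≤ fuel → i ≤ (trimInner cs n i words).1 := by
  intro fuel
  induction fuel with
  | zero =>
    intro i words h
    rw [trimInner, if_neg (by omega)]
  | succ f ih =>
    intro i words h
    rw [trimInner]
    by_cases hc : i < n ∧ cs.getD i ' ' ≠ ' '
    · rw [if_pos hc]
      have := ih (i + 1) (words ++ [String.ofList [cs.getD i ' ']]) (by omega)
      omega
    · rw [if_neg hc]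

-- outer while: `while i < n: if s[i] != " ": <inner>; words.append(" "); i += 1`
def trimOuter (cs : List Char) (n : Nat) (i : Nat) (words : List String) : List String :=
  if h : i < n then
    if cs.getD i ' ' ≠ ' ' then
      let r := trimInner cs n i words
      trimOuter cs n (r.1 + 1) (r.2 ++ [" "])
    else trimOuter cs n (i + 1) words
  else words
termination_by n - i
decreasing_by
  · have := trimInner_fst_ge cs n (n - i) i words (by omega)
    omega
  · omega

def trimSpaces (s : String) : List String :=
  let cs := s.toList
  let words := trimOuter cs cs.length 0 []
  PySem.List.slice words (some 0) (some ((words.length : Int) - 1))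

-- ===== PORT B =====
-- B: list(" ".join(w for w in s.split(" ") if w))
def trimSpaces_alt (s : String) : List String :=
  (PySem.Str.join " " (((PySem.Str.split? s " ").getD []).filter (fun w => w ≠ ""))).toList.map
    (fun c => String.ofList [c])

-- ===== PRECONDITION & SPEC =====
def Spec_trimSpaces (s : String) (out : List String) : Prop := out = trimSpaces_alt s
instance (s : String) (out : List String) : Decidable (Spec_trimSpaces s out) := by unfold Spec_trimSpaces; infer_instance

-- ===== CLAIM (what is proved, stated in full; the proofs are below) =====
def Claim_equal_trimSpaces : Prop := ∀ (s : String), Dom_trimSpaces s → Spec_trimSpaces s (trimSpaces s)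

-- ===== LEMMAS AND PROOFS =====

-- "is not a space", kept as a named Bool predicate so simp does not re-normalize it
def nsp (c : Char) : Bool := c != ' '

theorem nsp_true {c : Char} (h : c ≠ ' ') : nsp c = true := by simp [nsp, h]
theorem nsp_false {c : Char} (h : c = ' ') : nsp c = false := by simp [nsp, h]

-- the maximal non-space runs of a character list
def toks : List Char → List (List Char)
  | [] => []
  | c :: rest =>
    if c = ' ' then toks rest
    else (c :: rest.takeWhile nsp) :: toks (rest.dropWhile nsp)
termination_by l => l.length
decreasing_by
  · simp
  · have := List.length_dropWhile_le (p := nsp) (l := rest)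
    simp only [List.length_cons]; omega

-- accumulator form of Python's str.split(" ")
def splitAcc (cur : List Char) : List Char → List (List Char)
  | [] => [cur]
  | c :: rest => if c = ' ' then cur :: splitAcc [] rest else splitAcc (cur ++ [c]) rest

def sing (c : Char) : String := String.ofList [c]

def flatToks (ts : List (List Char)) : List String :=
  ts.flatMap (fun t => t.map sing ++ [" "])

theorem splitOn_go_eq (fuel : Nat) :
    ∀ (l cur : List Char) (acc : List (List Char)), l.length < fuel →
      PySem.Chars.splitOn.go [' '] fuel l cur acc = acc.reverse ++ splitAcc cur.reverse l := by
  induction fuel with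
  | zero => intro l cur acc h; omega
  | succ f ih =>
    intro l cur acc h
    cases l with
    | nil => simp [PySem.Chars.splitOn.go, splitAcc]
    | cons c rest =>
      rw [PySem.Chars.splitOn.go]
      by_cases hc : c = ' '
      · subst hc
        have hpre : List.isPrefixOf [' '] (' ' :: rest) = true := by
          simp [List.isPrefixOf]
        rw [if_pos hpre]
        have hdrop : List.drop [' '].length (' ' :: rest) = rest := rfl
        rw [hdrop, ih rest [] (cur.reverse :: acc) (by simp at h; omega)]
        simp [splitAcc]
      · have hpre : ¬ (List.isPrefixOf [' '] (c :: rest) = true) := by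
          simp [List.isPrefixOf]; exact fun h => absurd h.symm hc
        rw [if_neg hpre, ih rest (c :: cur) acc (by simp at h ⊢; omega)]
        simp [splitAcc, hc]

theorem splitOn_eq_splitAcc (l : List Char) :
    PySem.Chars.splitOn l [' '] = splitAcc [] l := by
  have := splitOn_go_eq (l.length + 1) l [] [] (by omega)
  simpa [PySem.Chars.splitOn] using this

theorem splitAcc_eq (l : List Char) : ∀ cur,
    splitAcc cur l = (cur ++ l.takeWhile nsp) ::
      (match l.dropWhile nsp with
       | [] => []
       | _ :: t => splitAcc [] t) := by
  induction l with
  | nil => intro cur; simp [splitAcc]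
  | cons c rest ih =>
    intro cur
    by_cases hc : c = ' '
    · rw [splitAcc, if_pos hc, List.takeWhile_cons, List.dropWhile_cons,
        nsp_false hc]
      simp
    · rw [splitAcc, if_neg hc, List.takeWhile_cons, List.dropWhile_cons,
        nsp_true hc, ih (cur ++ [c])]
      simp

theorem filter_splitAcc (l : List Char) :
    (splitAcc [] l).filter (fun t => t ≠ []) = toks l := by
  induction hl : l.length using Nat.strong_induction_on generalizing l with
  | _ n ih =>
  cases l with
  | nil => simp [splitAcc, toks]
  | cons c rest =>
    by_cases hc : c = ' '
    · rw [splitAcc, if_pos hc, toks, if_pos hc, List.filter_cons]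
      simp only [ne_eq, not_true_eq_false, decide_false, Bool.false_eq_true, if_false]
      exact ih rest.length (by simp [← hl]) rest rfl
    · rw [toks, if_neg hc, splitAcc, if_neg hc, splitAcc_eq]
      simp only [List.nil_append, List.singleton_append]
      rcases hdw : rest.dropWhile nsp with _ | ⟨d, t⟩
      · simp [toks]
      · have ht : t.length < n := by
          have h1 := List.length_dropWhile_le (p := nsp) (l := rest)
          rw [hdw] at h1
          simp only [List.length_cons] at h1 hl
          omega
        rw [List.filter_cons]
        have hne : decide ((c :: rest.takeWhile nsp) ≠ []) = true := by simp
        rw [hne, if_pos rfl, ih t.length ht t rfl]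
        have hd : d = ' ' := by
          have := List.head_dropWhile_not (p := nsp) (l := rest)
            (by rw [hdw]; simp)
          simp only [hdw, List.head_cons, nsp] at this
          simpa using this
        subst hd
        have h5 : toks (' ' :: t) = toks t := by simp [toks]
        rw [h5]

-- dropWhile is a drop by the takeWhile length
theorem dropWhile_eq_drop (l : List Char) :
    l.dropWhile nsp = l.drop (l.takeWhile nsp).length := by
  induction l with
  | nil => rfl
  | cons c rest ih =>
    rw [List.dropWhile_cons, List.takeWhile_cons]
    by_cases hc : nsp c = true
    · rw [if_pos hc, hc]
      simpa using ih
    · rw [if_neg hc, Bool.not_eq_true] at *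
      rw [hc]
      simp

-- the inner loop collects exactly the leading non-space run of (cs.drop i)
theorem trimInner_eq (cs : List Char) (n : Nat) (hn : n = cs.length) (fuel : Nat) :
    ∀ i words, n - i ≤ fuel →
      trimInner cs n i words =
        (i + ((cs.drop i).takeWhile nsp).length,
         words ++ ((cs.drop i).takeWhile nsp).map sing) := by
  induction fuel with
  | zero =>
    intro i words h
    rw [trimInner, if_neg (by omega)]
    have hdrop : cs.drop i = [] := List.drop_eq_nil_of_le (by omega)
    rw [hdrop]
    simp
  | succ f ih =>
    intro i words h
    rw [trimInner]
    by_cases hlt : i < n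
    · have hilt : i < cs.length := by omega
      have hdrop : cs.drop i = cs[i] :: cs.drop (i + 1) := List.drop_eq_getElem_cons hilt
      have hgd : cs.getD i ' ' = cs[i] := by
        simp [List.getD, List.getElem?_eq_getElem hilt]
      by_cases hsp : cs[i] = ' '
      · rw [if_neg (by rw [hgd]; tauto), hdrop,
          List.takeWhile_cons_of_neg (by rw [nsp_false hsp]; simp)]
        simp
      · rw [if_pos (by rw [hgd]; exact ⟨hlt, hsp⟩), ih (i + 1) _ (by omega), hdrop,
          List.takeWhile_cons_of_pos (nsp_true hsp), hgd]
        simp only [List.length_cons, List.map_cons, List.append_assoc,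
          List.singleton_append, sing, Prod.mk.injEq]
        constructor
        · omega
        · trivial
    · rw [if_neg (by tauto)]
      have hdrop : cs.drop i = [] := List.drop_eq_nil_of_le (by omega)
      rw [hdrop]
      simp

-- the outer loop appends the flattened runs of the remaining suffix
theorem trimOuter_eq (cs : List Char) (n : Nat) (hn : n = cs.length) (fuel : Nat) :
    ∀ i words, n - i ≤ fuel →
      trimOuter cs n i words = words ++ flatToks (toks (cs.drop i)) := by
  induction fuel with
  | zero =>
    intro i words h
    rw [trimOuter, dif_neg (by omega)]
    have hdrop : cs.drop i = [] := List.drop_eq_nil_of_le (by omega)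
    rw [hdrop]
    simp [toks, flatToks]
  | succ f ih =>
    intro i words h
    rw [trimOuter]
    by_cases hlt : i < n
    · have hilt : i < cs.length := by omega
      have hdrop : cs.drop i = cs[i] :: cs.drop (i + 1) := List.drop_eq_getElem_cons hilt
      have hgd : cs.getD i ' ' = cs[i] := by
        simp [List.getD, List.getElem?_eq_getElem hilt]
      rw [dif_pos hlt]
      by_cases hsp : cs[i] = ' '
      · have h4 : toks (cs[i] :: cs.drop (i + 1)) = toks (cs.drop (i + 1)) := by
          rw [toks, if_pos hsp]
        rw [if_neg (by rw [hgd]; simp [hsp]), ih (i + 1) words (by omega), hdrop, h4]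
      · rw [if_pos (by rw [hgd]; exact hsp)]
        have hinner := trimInner_eq cs n hn (n - i) i words (by omega)
        set r := ((cs.drop i).takeWhile nsp) with hr
        have hrlen : 1 ≤ r.length := by
          rw [hr, hdrop, List.takeWhile_cons_of_pos (nsp_true hsp)]
          simp
        have hdw : cs.drop (i + r.length) = (cs.drop i).dropWhile nsp := by
          rw [dropWhile_eq_drop, ← hr, List.drop_drop]
        rw [hinner]
        simp only
        rw [ih (i + r.length + 1) _ (by omega)]
        have hsplit : flatToks (toks (cs.drop i)) =
            r.map sing ++ [" "] ++ flatToks (toks (cs.drop (i + r.length + 1))) := by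
          have htk : toks (cs.drop i) = r :: toks ((cs.drop i).dropWhile nsp) := by
            rw [hdrop, toks, if_neg hsp]
            congr 1
            · rw [hr, hdrop, List.takeWhile_cons_of_pos (nsp_true hsp)]
            · congr 1
              rw [List.dropWhile_cons_of_pos (nsp_true hsp)]
          rw [htk, ← hdw]
          rcases hnext : cs.drop (i + r.length) with _ | ⟨d, t⟩
          · have : cs.drop (i + r.length + 1) = [] :=
              List.drop_eq_nil_of_le (by
                have := List.drop_eq_nil_iff.mp hnext; omega)
            rw [this]
            simp [flatToks, toks]
          · have hd : d = ' ' := by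
              have hne : (cs.drop i).dropWhile nsp ≠ [] := by
                rw [← hdw, hnext]; simp
              have hthis := List.head_dropWhile_not (p := nsp) (l := cs.drop i) hne
              simp only [← hdw, hnext, List.head_cons, nsp] at hthis
              simpa using hthis
            subst hd
            have ht : t = cs.drop (i + r.length + 1) := by
              have h2 : cs.drop (i + r.length + 1) = (cs.drop (i + r.length)).drop 1 := by
                rw [List.drop_drop]
              rw [h2, hnext]; simp
            rw [← ht]
            have h3 : toks (' ' :: t) = toks t := by simp [toks]
            simp [flatToks, h3]
        rw [hsplit]
        simp
    · rw [dif_neg hlt]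
      have hdrop : cs.drop i = [] := List.drop_eq_nil_of_le (by omega)
      rw [hdrop]
      simp [toks, flatToks]

-- joining the runs with single spaces = flattening with trailing spaces, minus the last
theorem flatToks_eq_join (ts : List (List Char)) (hne : ts ≠ []) :
    flatToks ts = (PySem.Chars.join [' '] ts).map sing ++ [" "] := by
  induction ts with
  | nil => simp at hne
  | cons t rest ih =>
    cases rest with
    | nil => simp [flatToks, PySem.Chars.join_singleton]
    | cons u more =>
      rw [PySem.Chars.join_cons_cons]
      have h1 : flatToks (t :: u :: more) = (t.map sing ++ [" "]) ++ flatToks (u :: more) := by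
        simp [flatToks]
      rw [h1, ih (by simp)]
      simp [sing]

theorem slice_eq_dropLast (ws : List String) :
    PySem.List.slice ws (some 0) (some ((ws.length : Int) - 1)) = ws.dropLast := by
  cases ws with
  | nil => simp [PySem.List.slice, PySem.List.clampIdx]
  | cons w rest =>
    simp only [PySem.List.slice, PySem.List.clampIdx]
    have h1 : ¬ ((0 : Int) < 0) := by omega
    have h2 : ¬ (((w :: rest).length : Int) - 1 < 0) := by
      simp only [List.length_cons]; push_cast; omega
    simp only [h1, if_false, h2]
    have h3 : min (Int.toNat 0) (w :: rest).length = 0 := by simp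
    have h4 : min (((w :: rest).length : Int) - 1).toNat (w :: rest).length
        = (w :: rest).length - 1 := by
      simp only [List.length_cons]; omega
    rw [h3, h4]
    simp [List.dropLast_eq_take]

theorem trimSpaces_alt_eq (s : String) :
    trimSpaces_alt s = (PySem.Chars.join [' '] (toks s.toList)).map sing := by
  unfold trimSpaces_alt
  have hsplit : PySem.Str.split? s " " =
      some ((PySem.Chars.splitOn s.toList [' ']).map String.ofList) := by
    simp [PySem.Str.split?, PySem.Chars.split?]
  rw [hsplit]
  simp only [Option.getD_some]
  have hfil : ((PySem.Chars.splitOn s.toList [' ']).map String.ofList).filter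
      (fun w => w ≠ "") = (toks s.toList).map String.ofList := by
    rw [List.filter_map, splitOn_eq_splitAcc, ← filter_splitAcc]
    refine congrArg (List.map String.ofList) (List.filter_congr ?_)
    intro t _
    simp only [Function.comp_apply, ne_eq]
    rw [decide_eq_decide]
    refine not_congr ⟨fun h => ?_, fun h => by subst h; rfl⟩
    have := congrArg String.toList h
    simpa using this
  rw [hfil, PySem.Str.toList_join, List.map_map]
  have hcomp : (String.toList ∘ String.ofList) = id := by
    funext t; simp
  rw [hcomp, List.map_id]
  rfl

-- ===== VERDICT (by name: the statement is the Claim_ definition above) =====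
theorem trimSpaces_spec : Claim_equal_trimSpaces := by
  intro s _
  unfold Spec_trimSpaces trimSpaces
  simp only
  rw [trimOuter_eq s.toList s.toList.length rfl s.toList.length 0 [] (by omega),
      List.drop_zero, slice_eq_dropLast, trimSpaces_alt_eq, List.nil_append]
  rcases hts : toks s.toList with _ | ⟨t, rest⟩
  · simp [flatToks, PySem.Chars.join, List.intercalate]
  · rw [flatToks_eq_join _ (by simp), List.dropLast_concat]
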